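-- pv_equiv track=rewrite | github.com/Boragozz/Homeworks | HW3.py | places
-- ===== SOURCE A (Python) =====
-- def places(arr):
--     big = []
--     rights = -float('inf') # Задаем последнее значение массива как минус бесконечность -float('inf'). Для того, чтобы
--     # гарантированно вернуть последнее значение массива. Так как любое число больше чем минус бесконечность
--
--     for num in reversed(arr): # перебираем массив справа налево
--         if num > rights:
--             big.append(num)
--             rights = num #записываем результаты , соответствующие условию, последовательно
--
--     return big[::-1] # переворачиваем обратно массив, чтобы создать верный порядок вывода
-- ===== SOURCE B (Python) =====
-- def places(arr):
--     n = len(arr)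
--     NEG = float('-inf')
--     # suffix-maximum table: suf[i] = max of arr[i+1:], -inf past the end
--     suf = [NEG] * n
--     m = NEG
--     for i in range(n - 1, -1, -1):
--         suf[i] = m
--         m = max(m, arr[i])
--     # forward pass: emit arr[i] when it beats everything to its right
--     return [arr[i] for i in range(n) if arr[i] > suf[i]]
-- ===== Notes on version B (the rewrite author's own statement) =====
-- stated objective: alternative
-- what changed: Replaces the single right-to-left running-max scan with final reversal by two passes: a backward pass building an explicit suffix-maximum table, then a forward filtering pass emitting elements in order with no reversal.
import Mathlib
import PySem

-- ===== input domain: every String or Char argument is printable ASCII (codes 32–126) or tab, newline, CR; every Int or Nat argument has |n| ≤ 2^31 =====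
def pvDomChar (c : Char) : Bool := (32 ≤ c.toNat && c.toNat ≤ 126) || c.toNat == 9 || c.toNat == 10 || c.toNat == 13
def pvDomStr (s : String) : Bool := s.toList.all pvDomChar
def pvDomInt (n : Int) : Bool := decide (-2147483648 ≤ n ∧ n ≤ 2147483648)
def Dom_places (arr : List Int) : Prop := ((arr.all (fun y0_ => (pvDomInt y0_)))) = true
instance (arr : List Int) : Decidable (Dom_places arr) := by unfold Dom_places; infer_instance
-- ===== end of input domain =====

-- B replaces A's right-to-left running-max scan + reversal with a suffix-maximum table and a forward filter pass (alternative decomposition, same cost); return value only.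
-- ===== PORT A =====
-- rights : Option Int, none playing the role of -float('inf')
def pvGtR (num : Int) (rights : Option Int) : Bool :=
  match rights with
  | none => true
  | some r => decide (num > r)

def pvStepA (st : List Int × Option Int) (num : Int) : List Int × Option Int :=
  if pvGtR num st.2 then (st.1 ++ [num], some num) else st

def places (arr : List Int) : List Int :=
  let st := arr.reverse.foldl pvStepA ([], none)
  st.1.reverse

-- ===== PORT B =====
-- optMax m x = max(m, x) with m possibly -inf (none)
def pvOptMax (m : Option Int) (x : Int) : Option Int :=
  match m with
  | none => some x
  | some r => some (max r x)

-- backward pass of Source B: returns (suffix-max table, running max m); table entry i = max of arr[i+1:]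
def pvSufTable : List Int → List (Option Int) × Option Int
  | [] => ([], none)
  | x :: xs => ((pvSufTable xs).2 :: (pvSufTable xs).1, pvOptMax (pvSufTable xs).2 x)

-- forward pass: emit arr[i] whenever arr[i] > suf[i]
def places_alt (arr : List Int) : List Int :=
  (arr.zip (pvSufTable arr).1).filterMap (fun p => if pvGtR p.1 p.2 then some p.1 else none)

-- ===== PRECONDITION & SPEC =====
def Spec_places (arr : List Int) (out : List Int) : Prop := out = places_alt arr
instance (arr : List Int) (out : List Int) : Decidable (Spec_places arr out) := by unfold Spec_places; infer_instance

-- ===== CLAIM (what is proved, stated in full; the proofs are below) =====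
def Claim_equal_places : Prop := ∀ (arr : List Int), Dom_places arr → Spec_places arr (places arr)

-- ===== LEMMAS AND PROOFS =====
lemma places_alt_cons (x : Int) (xs : List Int) :
    places_alt (x :: xs) =
      (if pvGtR x (pvSufTable xs).2 then x :: places_alt xs else places_alt xs) := by
  by_cases h : pvGtR x (pvSufTable xs).2 = true
  · simp [places_alt, pvSufTable, h]
  · simp [places_alt, pvSufTable, h]

lemma pvStateChar (arr : List Int) :
    arr.reverse.foldl pvStepA ([], none) = ((places_alt arr).reverse, (pvSufTable arr).2) := by
  induction arr with
  | nil => simp [places_alt, pvSufTable]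
  | cons x xs ih =>
    rw [List.reverse_cons, List.foldl_append, ih, places_alt_cons]
    simp only [List.foldl_cons, List.foldl_nil]
    by_cases h : pvGtR x (pvSufTable xs).2 = true
    · have hm : pvOptMax (pvSufTable xs).2 x = some x := by
        cases hs : (pvSufTable xs).2 with
        | none => rfl
        | some r =>
          have : r < x := by simpa [pvGtR, hs] using h
          simp [pvOptMax, max_eq_right this.le]
      simp [pvStepA, pvSufTable, h, hm]
    · obtain ⟨r, hs, hr⟩ : ∃ r, (pvSufTable xs).2 = some r ∧ x ≤ r := by
        cases hs : (pvSufTable xs).2 with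
        | none => simp [pvGtR, hs] at h
        | some r => exact ⟨r, rfl, by simpa [pvGtR, hs, not_lt] using h⟩
      have hg : pvGtR x (some r) = false := by simp [pvGtR]; omega
      simp [pvStepA, pvSufTable, hs, pvOptMax, max_eq_left hr, hg]

-- ===== VERDICT (by name: the statement is the Claim_ definition above) =====
theorem places_spec : Claim_equal_places := by
  intro arr _
  show ((arr.reverse.foldl pvStepA ([], none)).1).reverse = places_alt arr
  rw [pvStateChar, List.reverse_reverse]
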